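-- pv_equiv track=rewrite | github.com/HongEunho/Python-Algorithm-Notes | Implementation/BaekJoon9020.py | goldPartition
-- ===== SOURCE A (Python) =====
-- import math
--
-- def isPrime(x):
--     if x == 1:
--         return False
--     for i in range(2, int(math.sqrt(x)) + 1):
--         if x % i == 0:
--             return False
--     return True
--
-- def goldPartition(x):
--     result = []
--     for i in range(2, x//2+1):
--         if isPrime(i) and isPrime(x-i):
--             if not result:
--                 result.append(i)
--                 result.append(x-i)
--             else:
--                 if result[1]-result[0] > x - 2*i:
--                     result[0] = i
--                     result[1] = x-i
--
--     return result
-- ===== SOURCE B (Python) =====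
-- import math
--
-- def goldPartition(x):
--     # minimal-difference Goldbach pair: scan i downward from x//2, return first prime pair
--     def prime(n):
--         return n >= 2 and all(n % d for d in range(2, math.isqrt(n) + 1))
--     for i in range(x // 2, 1, -1):
--         if prime(i) and prime(x - i):
--             return [i, x - i]
--     return []
-- ===== Notes on version B (the rewrite author's own statement) =====
-- stated objective: alternative
-- what changed: B scans i downward from x//2 and returns the first prime pair found (early exit), instead of A's full upward scan that keeps updating a best-pair accumulator via a difference comparison.
import Mathlib
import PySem

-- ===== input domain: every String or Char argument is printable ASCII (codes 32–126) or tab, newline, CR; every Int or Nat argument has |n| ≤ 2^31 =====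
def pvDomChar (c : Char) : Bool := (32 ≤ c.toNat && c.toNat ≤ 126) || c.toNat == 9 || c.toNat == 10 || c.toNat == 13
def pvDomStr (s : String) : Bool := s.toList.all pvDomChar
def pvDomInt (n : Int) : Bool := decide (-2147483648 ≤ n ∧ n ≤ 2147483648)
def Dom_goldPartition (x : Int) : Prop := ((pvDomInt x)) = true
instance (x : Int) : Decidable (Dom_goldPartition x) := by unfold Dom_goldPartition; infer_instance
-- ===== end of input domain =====

-- B replaces A's full upward scan with an early-exiting downward scan from x//2 (alternative decomposition, same worst-case cost).

-- ===== PORT A =====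
-- int(math.sqrt(x)) equals the integer square root exactly for 0 ≤ x ≤ 2^31 (53-bit doubles), ported as Nat.sqrt
def isPrimeA (x : Int) : Bool :=
  if x == 1 then false
  else (PySem.List.pyRange 2 (Int.ofNat x.toNat.sqrt + 1) 1).all (fun i => !(PySem.Int.mod x i == 0))

-- loop body of A; in context `result` is always [] or a two-element list, so the pyGetD defaults are unreachable
def goldStep (x : Int) (result : List Int) (i : Int) : List Int :=
  if isPrimeA i && isPrimeA (x - i) then
    if result.isEmpty then [i, x - i]
    else
      if (PySem.List.pyGetD result 1 0) - (PySem.List.pyGetD result 0 0) > x - 2 * i then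
        [i, x - i]
      else result
  else result

def goldPartition (x : Int) : List Int :=
  (PySem.List.pyRange 2 (PySem.Int.floordiv x 2 + 1) 1).foldl (goldStep x) []

-- ===== PORT B =====
-- math.isqrt(n) ported as Nat.sqrt
def primeB (n : Int) : Bool :=
  decide (2 ≤ n) && (PySem.List.pyRange 2 (Int.ofNat n.toNat.sqrt + 1) 1).all (fun d => !(PySem.Int.mod n d == 0))

def goldPartition_alt (x : Int) : List Int :=
  match (PySem.List.pyRange (PySem.Int.floordiv x 2) 1 (-1)).find? (fun i => primeB i && primeB (x - i)) with
  | some i => [i, x - i]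
  | none => []

-- ===== PRECONDITION & SPEC =====
def Spec_goldPartition (x : Int) (out : List Int) : Prop := out = goldPartition_alt x
instance (x : Int) (out : List Int) : Decidable (Spec_goldPartition x out) := by unfold Spec_goldPartition; infer_instance

-- ===== CLAIM (what is proved, stated in full; the proofs are below) =====
def Claim_equal_goldPartition : Prop := ∀ (x : Int), Dom_goldPartition x → Spec_goldPartition x (goldPartition x)

-- ===== LEMMAS AND PROOFS =====

theorem prime_eq (n : Int) (h : 2 ≤ n) : isPrimeA n = primeB n := by
  have h1 : (n == 1) = false := by simp; omega
  have h2 : decide (2 ≤ n) = true := by simp [h]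
  simp [isPrimeA, primeB, h1, h2]

theorem find_congr {l : List Int} {p q : Int → Bool} (h : ∀ a ∈ l, p a = q a) :
    l.find? p = l.find? q := by
  induction l with
  | nil => rfl
  | cons a t ih => simp only [List.find?, h a (by simp)]; split <;> simp_all

-- A's fold keeps exactly the last prime pair of the range (= first in reversed order)
theorem foldA (x a : Int) (n : Nat) :
    (PySem.List.pyRange a (a + n) 1).foldl (goldStep x) [] =
      match (PySem.List.pyRange a (a + n) 1).reverse.find?
          (fun i => isPrimeA i && isPrimeA (x - i)) with
      | some i => [i, x - i]
      | none => [] := by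
  induction n with
  | zero =>
    rw [PySem.List.pyRange_one_eq_nil (by omega : a + ((0:Nat):Int) ≤ a)]
    rfl
  | succ n ih =>
    have hb : a + ((n+1 : Nat) : Int) = (a + (n : Nat)) + 1 := by push_cast; ring
    rw [hb, PySem.List.pyRange_one_succ_right (by omega : a ≤ a + ((n:Nat):Int)),
        List.foldl_append, ih]
    set b := a + ((n:Nat):Int) with hbdef
    simp only [List.reverse_append, List.reverse_cons, List.reverse_nil, List.nil_append,
      List.singleton_append, List.find?]
    cases hPb : (isPrimeA b && isPrimeA (x - b)) with
    | false =>
      cases hfind : (PySem.List.pyRange a b 1).reverse.find?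
          (fun i => isPrimeA i && isPrimeA (x - i)) with
      | none => simp [goldStep, hPb]
      | some i0 => simp [goldStep, hPb]
    | true =>
      cases hfind : (PySem.List.pyRange a b 1).reverse.find?
          (fun i => isPrimeA i && isPrimeA (x - i)) with
      | none => simp [goldStep, hPb]
      | some i0 =>
        have hmem : i0 ∈ PySem.List.pyRange a b 1 := by
          have := List.mem_of_find?_eq_some hfind
          simpa using this
        have hlt : i0 < b := ((PySem.List.mem_pyRange_one).1 hmem).2
        have hcond : (x - i0) - i0 > x - 2 * b := by omega
        simp [goldStep, hPb, hcond, PySem.List.pyGetD]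


-- ===== VERDICT (by name: the statement is the Claim_ definition above) =====
theorem goldPartition_spec : Claim_equal_goldPartition := by
  intro x _
  unfold Spec_goldPartition goldPartition goldPartition_alt
  set m := PySem.Int.floordiv x 2 with hm
  by_cases hm1 : m ≤ 1
  · rw [PySem.List.pyRange_one_eq_nil (by omega : m + 1 ≤ 2),
        PySem.List.pyRange_neg_one_eq_nil (by omega : m ≤ 1)]
    rfl
  · have hx : 2 * m ≤ x := by
      have h1 := PySem.Int.floordiv_mul_add_mod x 2
      have h2 := PySem.Int.mod_nonneg x (by omega : (0:Int) < 2)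
      omega
    have h21 : (2 : Int) + (((m - 1).toNat : Nat) : Int) = m + 1 := by omega
    have hA := foldA x 2 (m - 1).toNat
    rw [h21] at hA
    have hrev : PySem.List.pyRange m 1 (-1) = (PySem.List.pyRange 2 (m + 1) 1).reverse := by
      have h := PySem.List.pyRange_neg_one_eq_reverse m 1
      norm_num at h
      exact h
    have hfind : ((PySem.List.pyRange 2 (m + 1) 1).reverse.find?
          (fun i => isPrimeA i && isPrimeA (x - i)))
        = ((PySem.List.pyRange 2 (m + 1) 1).reverse.find?
          (fun i => primeB i && primeB (x - i))) := by
      apply find_congr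
      intro i hi
      rw [List.mem_reverse] at hi
      have hi2 := (PySem.List.mem_pyRange_one).1 hi
      have e1 : isPrimeA i = primeB i := prime_eq i (by omega)
      have e2 : isPrimeA (x - i) = primeB (x - i) := prime_eq (x - i) (by omega)
      rw [e1, e2]
    rw [hA, hrev, hfind]
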